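-- pv_equiv track=rewrite | github.com/rainrong/MILP_SLIM | SLIM.py | CreateIDAOutputVariables
-- ===== SOURCE A (Python) =====
-- def CreateIDAOutputVariables(nn):
--     """
--     生成模型中末轮输出变量字（nibble）
--     """
--
--     n = int(nn%120)
--     t1 = n//15
--     t2 = int(n%15)
--     temp3 = '{:04b}'.format(t2+1)
--
--     array = []
--     if t1 > 0:
--         for i in range(0, 4*t1):
--             array.append(0)
--
--     for j in range(0, 4):#4*t1~4*t1+4
--             array.append(temp3[j])
--
--     if t1 < 7:
--         for i in range(4*t1+4, 32):
--             array.append(0)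
--
--     str_array = [str(x) for x in array]#将一个list中元素全部变成字符串类型,也可以利用map函数：str_list = list(map(str, my_list))
--     return str_array
-- ===== SOURCE B (Python) =====
-- def CreateIDAOutputVariables(nn):
--     n = int(nn % 120)
--     t1 = n // 15
--     t2 = int(n % 15)
--     val = (t2 + 1) << (4 * (7 - t1))
--     return list('{:032b}'.format(val))
-- ===== Notes on version B (the rewrite author's own statement) =====
-- stated objective: simpler
-- what changed: The three appending loops (leading zeros, the four nibble bits, trailing zeros) are replaced by one closed-form integer val = (t2+1) << (4*(7-t1)) rendered with '{:032b}' into the 32 one-character strings.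
import Mathlib
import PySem

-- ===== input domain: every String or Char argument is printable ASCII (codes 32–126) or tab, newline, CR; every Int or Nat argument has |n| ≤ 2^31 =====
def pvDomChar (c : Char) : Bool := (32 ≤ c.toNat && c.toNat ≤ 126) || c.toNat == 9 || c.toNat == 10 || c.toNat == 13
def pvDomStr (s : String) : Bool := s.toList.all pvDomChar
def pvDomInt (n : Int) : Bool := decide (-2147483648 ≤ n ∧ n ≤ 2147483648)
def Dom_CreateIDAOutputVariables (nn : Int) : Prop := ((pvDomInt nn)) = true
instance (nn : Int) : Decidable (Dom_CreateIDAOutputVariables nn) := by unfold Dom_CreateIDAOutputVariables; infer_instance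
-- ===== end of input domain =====

-- B replaces A's three appending loops by one closed-form integer (nibble shifted into place) formatted as a 32-bit binary string; objective: simpler.


-- ===== PORT A =====
-- '{:04b}'.format(m) for 0 ≤ m: binary digits zero-padded on the left to width 4 (exact for nonnegative m)
def pvFmt04b (m : Int) : List Char :=
  let bits := PySem.Int.toBinChars m
  List.replicate (4 - bits.length) '0' ++ bits

-- A's body after 'n = int(nn%120)'; the array holds ints (.inl) and the 1-char strings temp3[j] (.inr),
-- and the final comprehension applies str to each element, exactly as in the Python.
def pvACore (n : Int) : List String :=
  let t1 := PySem.Int.floordiv n 15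
  let t2 := PySem.Int.mod n 15
  let temp3 := pvFmt04b (t2 + 1)
  let array : List (Sum Int Char) := []
  let array := if t1 > 0 then
      (PySem.List.pyRange 0 (4 * t1) 1).foldl (fun acc _ => acc ++ [Sum.inl 0]) array
    else array
  let array := (PySem.List.pyRange 0 4 1).foldl
      (fun acc j => acc ++ [Sum.inr (PySem.List.pyGetD temp3 j ' ')]) array
  let array := if t1 < 7 then
      (PySem.List.pyRange (4 * t1 + 4) 32 1).foldl (fun acc _ => acc ++ [Sum.inl 0]) array
    else array
  array.map (fun x => match x with
    | Sum.inl k => PySem.Int.toStr k       -- str(0) = "0"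
    | Sum.inr c => String.mk [c])          -- str of a 1-char string is itself

def CreateIDAOutputVariables (nn : Int) : List String :=
  pvACore (PySem.Int.mod nn 120)

-- ===== PORT B =====
-- B's body after 'n = int(nn%120)': one shifted integer, formatted '{:032b}', split into 1-char strings.
def pvBCore (n : Int) : List String :=
  let t1 := PySem.Int.floordiv n 15
  let t2 := PySem.Int.mod n 15
  let val := (t2 + 1) <<< (4 * (7 - t1)).toNat
  let bits := PySem.Int.toBinChars val
  (List.replicate (32 - bits.length) '0' ++ bits).map (fun c => String.mk [c])

def CreateIDAOutputVariables_alt (nn : Int) : List String :=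
  pvBCore (PySem.Int.mod nn 120)

-- ===== PRECONDITION & SPEC =====
def Spec_CreateIDAOutputVariables (nn : Int) (out : List String) : Prop := out = CreateIDAOutputVariables_alt nn
instance (nn : Int) (out : List String) : Decidable (Spec_CreateIDAOutputVariables nn out) := by unfold Spec_CreateIDAOutputVariables; infer_instance

-- ===== CLAIM (what is proved, stated in full; the proofs are below) =====
def Claim_equal_CreateIDAOutputVariables : Prop := ∀ (nn : Int), Dom_CreateIDAOutputVariables nn → Spec_CreateIDAOutputVariables nn (CreateIDAOutputVariables nn)

-- ===== LEMMAS AND PROOFS =====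

-- the two cores agree on every residue 0 ≤ n < 120 (kernel evaluation of the 120 cases)
set_option maxHeartbeats 1000000 in
set_option maxRecDepth 8192 in
theorem pvCore_eq : ∀ m : Fin 120, pvACore ((m : Nat) : Int) = pvBCore ((m : Nat) : Int) := by decide

-- ===== VERDICT (by name: the statement is the Claim_ definition above) =====
theorem CreateIDAOutputVariables_spec : Claim_equal_CreateIDAOutputVariables := by
  intro nn _
  unfold Spec_CreateIDAOutputVariables CreateIDAOutputVariables CreateIDAOutputVariables_alt
  have h0 : (0:Int) < 120 := by norm_num
  have hge : 0 ≤ PySem.Int.mod nn 120 := PySem.Int.mod_nonneg nn h0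
  have hlt : PySem.Int.mod nn 120 < 120 := PySem.Int.mod_lt nn h0
  have hnat : PySem.Int.mod nn 120 = (((PySem.Int.mod nn 120).toNat : Nat) : Int) := (Int.toNat_of_nonneg hge).symm
  have hb : (PySem.Int.mod nn 120).toNat < 120 := by omega
  rw [hnat]
  exact pvCore_eq ⟨(PySem.Int.mod nn 120).toNat, hb⟩
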